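-- pv_equiv track=rewrite | github.com/sacmad21/whatsAgency | campaign/actions/creatives/design_campaign_creatives.py | parse_creative_block
-- ===== SOURCE A (Python) =====
-- def parse_creative_block(block: str) -> list:
--     """
--     Parses LLM output expecting:
--     Platform
--     Creative Title
--     Headline
--     Visual Theme
--     CTA
--     Mobile Tip
--     """
--     assets = []
--     current = {}
--     lines = block.strip().split("\n")
--     for line in lines:
--         if line.startswith("Platform:"):
--             if current:
--                 assets.append(current)
--                 current = {}
--             current["platform"] = line.split(":", 1)[1].strip()
--         elif line.startswith("Creative Title:"):
--             current["creative_title"] = line.split(":", 1)[1].strip()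
--         elif line.startswith("Headline:"):
--             current["headline"] = line.split(":", 1)[1].strip()
--         elif line.startswith("Visual Theme:"):
--             current["visual_theme"] = line.split(":", 1)[1].strip()
--         elif line.startswith("CTA:"):
--             current["cta"] = line.split(":", 1)[1].strip()
--         elif line.startswith("Mobile Tip:"):
--             current["mobile_tip"] = line.split(":", 1)[1].strip()
--     if current:
--         assets.append(current)
--     return assets
-- ===== SOURCE B (Python) =====
-- TABLE = [
--     ("Platform:", "platform"),
--     ("Creative Title:", "creative_title"),
--     ("Headline:", "headline"),
--     ("Visual Theme:", "visual_theme"),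
--     ("CTA:", "cta"),
--     ("Mobile Tip:", "mobile_tip"),
-- ]
--
--
-- def parse_creative_block(block: str) -> list:
--     lines = block.strip().split("\n")
--     # pass 1: cut the lines into segments, opening a new segment at each Platform line
--     segments = []
--     current_lines = []
--     for line in lines:
--         if line.startswith("Platform:"):
--             segments.append(current_lines)
--             current_lines = [line]
--         else:
--             current_lines.append(line)
--     segments.append(current_lines)
--     # pass 2: each segment becomes a dict via the prefix table; empty dicts are dropped
--     assets = []
--     for seg in segments:
--         d = {}
--         for line in seg:
--             for prefix, key in TABLE:
--                 if line.startswith(prefix):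
--                     d[key] = line.split(":", 1)[1].strip()
--                     break
--         if d:
--             assets.append(d)
--     return assets
-- ===== Notes on version B (the rewrite author's own statement) =====
-- stated objective: alternative
-- what changed: Replaces A's single stateful pass with an elif chain by two passes: first split the lines into segments at each 'Platform:' line, then build each segment's dict with one table-driven prefix loop, keeping only non-empty dicts.
import Mathlib
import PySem

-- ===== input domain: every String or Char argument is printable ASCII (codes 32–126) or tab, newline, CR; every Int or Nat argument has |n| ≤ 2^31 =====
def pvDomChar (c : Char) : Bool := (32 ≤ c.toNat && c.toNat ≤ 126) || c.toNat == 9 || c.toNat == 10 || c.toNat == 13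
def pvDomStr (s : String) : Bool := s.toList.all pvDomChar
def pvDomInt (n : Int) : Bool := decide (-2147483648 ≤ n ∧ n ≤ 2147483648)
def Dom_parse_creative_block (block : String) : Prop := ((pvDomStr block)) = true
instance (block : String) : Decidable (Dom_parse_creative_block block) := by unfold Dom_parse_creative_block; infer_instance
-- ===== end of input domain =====

-- B replaces A's single stateful elif-chain pass by two passes (segment at 'Platform:' lines, then a
-- table-driven per-segment dict build) — objective: alternative decomposition, same cost.

-- ===== PORT A =====

-- line.split(":", 1)[1].strip(); the index-1 access is guarded at every call site by a
-- startswith check whose prefix contains ':', so the defaults are never reached.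
def pvVal (line : String) : String :=
  PySem.Str.strip ((((PySem.Str.splitMax? line ":" 1).getD []).getD 1 ""))

def pvStepA (st : List (PySem.Dict String String) × PySem.Dict String String) (line : String) :
    List (PySem.Dict String String) × PySem.Dict String String :=
  if PySem.Str.startswith line "Platform:" then
    (if st.2.items.isEmpty then st.1 else st.1 ++ [st.2],
     (PySem.Dict.empty).insert "platform" (pvVal line))
  else if PySem.Str.startswith line "Creative Title:" then
    (st.1, st.2.insert "creative_title" (pvVal line))
  else if PySem.Str.startswith line "Headline:" then
    (st.1, st.2.insert "headline" (pvVal line))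
  else if PySem.Str.startswith line "Visual Theme:" then
    (st.1, st.2.insert "visual_theme" (pvVal line))
  else if PySem.Str.startswith line "CTA:" then
    (st.1, st.2.insert "cta" (pvVal line))
  else if PySem.Str.startswith line "Mobile Tip:" then
    (st.1, st.2.insert "mobile_tip" (pvVal line))
  else st

def parse_creative_block (block : String) : List (List (String × String)) :=
  let lines := (PySem.Str.split? (PySem.Str.strip block) "\n").getD []
  let st := lines.foldl pvStepA ([], PySem.Dict.empty)
  let assets := if st.2.items.isEmpty then st.1 else st.1 ++ [st.2]
  assets.map (·.items)

-- ===== PORT B =====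

def pvTable : List (String × String) :=
  [("Platform:", "platform"), ("Creative Title:", "creative_title"), ("Headline:", "headline"),
   ("Visual Theme:", "visual_theme"), ("CTA:", "cta"), ("Mobile Tip:", "mobile_tip")]

-- inner 'for prefix, key in TABLE: if line.startswith(prefix): d[key] = …; break'
def pvUpdB (d : PySem.Dict String String) (line : String) : PySem.Dict String String :=
  match pvTable.find? (fun pk => PySem.Str.startswith line pk.1) with
  | some pk => d.insert pk.2 (pvVal line)
  | none => d

def pvSegStep (st : List (List String) × List String) (line : String) :
    List (List String) × List String :=
  if PySem.Str.startswith line "Platform:" then (st.1 ++ [st.2], [line])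
  else (st.1, st.2 ++ [line])

def parse_creative_block_alt (block : String) : List (List (String × String)) :=
  let lines := (PySem.Str.split? (PySem.Str.strip block) "\n").getD []
  let st := lines.foldl pvSegStep ([], [])
  let segments := st.1 ++ [st.2]
  (segments.foldl (fun assets seg =>
      let d := seg.foldl pvUpdB PySem.Dict.empty
      if d.items.isEmpty then assets else assets ++ [d]) []).map (·.items)

-- ===== PRECONDITION & SPEC =====
def Spec_parse_creative_block (block : String) (out : List (List (String × String))) : Prop := out = parse_creative_block_alt block
instance (block : String) (out : List (List (String × String))) : Decidable (Spec_parse_creative_block block out) := by unfold Spec_parse_creative_block; infer_instance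

-- ===== CLAIM (what is proved, stated in full; the proofs are below) =====
def Claim_equal_parse_creative_block : Prop := ∀ (block : String), Dom_parse_creative_block block → Spec_parse_creative_block block (parse_creative_block block)

-- ===== LEMMAS AND PROOFS =====

-- A's non-Platform elif chain as a pure dict update
def pvUpdA (d : PySem.Dict String String) (line : String) : PySem.Dict String String :=
  if PySem.Str.startswith line "Creative Title:" then d.insert "creative_title" (pvVal line)
  else if PySem.Str.startswith line "Headline:" then d.insert "headline" (pvVal line)
  else if PySem.Str.startswith line "Visual Theme:" then d.insert "visual_theme" (pvVal line)
  else if PySem.Str.startswith line "CTA:" then d.insert "cta" (pvVal line)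
  else if PySem.Str.startswith line "Mobile Tip:" then d.insert "mobile_tip" (pvVal line)
  else d

def pvMaybe (d : PySem.Dict String String) : List (PySem.Dict String String) :=
  if d.items.isEmpty then [] else [d]

-- the common "emitted dicts" denotation: state = the dict accumulated so far
def pvE (d : PySem.Dict String String) : List String → List (PySem.Dict String String)
  | [] => pvMaybe d
  | l :: ls =>
    if PySem.Str.startswith l "Platform:" then
      pvMaybe d ++ pvE ((PySem.Dict.empty).insert "platform" (pvVal l)) ls
    else pvE (pvUpdA d l) ls

def pvBuild (seg : List String) : PySem.Dict String String :=
  seg.foldl pvUpdB PySem.Dict.empty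

def pvProc (segs : List (List String)) : List (PySem.Dict String String) :=
  segs.flatMap (fun seg => pvMaybe (pvBuild seg))

-- segment-level denotation: state = the lines of the open segment
def pvE2 (cur : List String) : List String → List (PySem.Dict String String)
  | [] => pvMaybe (pvBuild cur)
  | l :: ls =>
    if PySem.Str.startswith l "Platform:" then pvMaybe (pvBuild cur) ++ pvE2 [l] ls
    else pvE2 (cur ++ [l]) ls

theorem pvFlush (assets : List (PySem.Dict String String)) (d : PySem.Dict String String) :
    (if d.items.isEmpty then assets else assets ++ [d]) = assets ++ pvMaybe d := by
  unfold pvMaybe; split_ifs <;> simp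

theorem pvStepA_plat (assets : List (PySem.Dict String String)) (d : PySem.Dict String String)
    (l : String) (hp : PySem.Str.startswith l "Platform:" = true) :
    pvStepA (assets, d) l = (assets ++ pvMaybe d, (PySem.Dict.empty).insert "platform" (pvVal l)) := by
  unfold pvStepA
  rw [if_pos hp, pvFlush]

theorem pvStepA_nonplat (assets : List (PySem.Dict String String)) (d : PySem.Dict String String)
    (l : String) (hp : ¬ PySem.Str.startswith l "Platform:" = true) :
    pvStepA (assets, d) l = (assets, pvUpdA d l) := by
  unfold pvStepA pvUpdA
  rw [if_neg hp]
  split_ifs <;> rfl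

theorem pvA_char (ls : List String) :
    ∀ (assets : List (PySem.Dict String String)) (d : PySem.Dict String String),
    ((ls.foldl pvStepA (assets, d)).1 ++ pvMaybe (ls.foldl pvStepA (assets, d)).2)
      = assets ++ pvE d ls := by
  induction ls with
  | nil => intro assets d; simp [pvE]
  | cons l ls ih =>
    intro assets d
    simp only [List.foldl_cons, pvE]
    by_cases hp : PySem.Str.startswith l "Platform:" = true
    · rw [if_pos hp, pvStepA_plat assets d l hp, ih, List.append_assoc]
    · rw [if_neg hp, pvStepA_nonplat assets d l hp, ih]

theorem pvB_foldl_eq_proc (segs : List (List String)) :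
    ∀ (acc : List (PySem.Dict String String)),
    segs.foldl (fun assets seg =>
        let d := seg.foldl pvUpdB PySem.Dict.empty
        if d.items.isEmpty then assets else assets ++ [d]) acc
      = acc ++ pvProc segs := by
  induction segs with
  | nil => intro acc; simp [pvProc]
  | cons s ss ih =>
    intro acc
    simp only [List.foldl_cons, pvProc, List.flatMap_cons]
    rw [pvFlush acc (s.foldl pvUpdB PySem.Dict.empty), ih, List.append_assoc]
    rfl

theorem pvB_char (ls : List String) :
    ∀ (segs : List (List String)) (cur : List String),
    pvProc ((ls.foldl pvSegStep (segs, cur)).1 ++ [(ls.foldl pvSegStep (segs, cur)).2])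
      = pvProc segs ++ pvE2 cur ls := by
  induction ls with
  | nil => intro segs cur; simp [pvProc, pvE2]
  | cons l ls ih =>
    intro segs cur
    simp only [List.foldl_cons, pvE2, pvSegStep]
    by_cases hp : PySem.Str.startswith l "Platform:" = true
    · rw [if_pos hp, if_pos hp, ih]
      simp [pvProc]
    · rw [if_neg hp, if_neg hp, ih]

theorem pvUpd_agree (d : PySem.Dict String String) (l : String)
    (hp : ¬ PySem.Str.startswith l "Platform:" = true) : pvUpdB d l = pvUpdA d l := by
  unfold pvUpdB pvUpdA pvTable
  simp only [List.find?]
  by_cases h1 : PySem.Str.startswith l "Creative Title:" = true <;>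
    by_cases h2 : PySem.Str.startswith l "Headline:" = true <;>
    by_cases h3 : PySem.Str.startswith l "Visual Theme:" = true <;>
    by_cases h4 : PySem.Str.startswith l "CTA:" = true <;>
    by_cases h5 : PySem.Str.startswith l "Mobile Tip:" = true <;>
    simp only [Bool.not_eq_true] at hp h1 h2 h3 h4 h5 <;>
    simp only [hp, h1, h2, h3, h4, h5, if_true] <;> rfl

theorem pvBuild_plat_singleton (l : String) (hp : PySem.Str.startswith l "Platform:" = true) :
    pvBuild [l] = (PySem.Dict.empty).insert "platform" (pvVal l) := by
  unfold pvBuild pvUpdB pvTable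
  simp only [List.foldl_cons, List.foldl_nil, List.find?, hp]

theorem pvE2_eq_pvE (ls : List String) :
    ∀ (cur : List String), pvE2 cur ls = pvE (pvBuild cur) ls := by
  induction ls with
  | nil => intro cur; simp [pvE2, pvE]
  | cons l ls ih =>
    intro cur
    simp only [pvE2, pvE]
    by_cases hp : PySem.Str.startswith l "Platform:" = true
    · rw [if_pos hp, if_pos hp, ih, pvBuild_plat_singleton l hp]
    · rw [if_neg hp, if_neg hp, ih]
      have hb : pvBuild (cur ++ [l]) = pvUpdA (pvBuild cur) l := by
        unfold pvBuild
        rw [List.foldl_append, List.foldl_cons, List.foldl_nil, pvUpd_agree _ _ hp]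
      rw [hb]

-- ===== VERDICT (by name: the statement is the Claim_ definition above) =====
theorem parse_creative_block_spec : Claim_equal_parse_creative_block := by
  intro block _
  show parse_creative_block block = parse_creative_block_alt block
  unfold parse_creative_block parse_creative_block_alt
  simp only []
  rw [pvFlush, pvA_char, pvB_foldl_eq_proc, pvB_char, pvE2_eq_pvE]
  simp [pvProc, pvBuild]
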